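-- pv_equiv track=rewrite | github.com/krisiol23/Advent_of_code | 2023/14/part2.py | roll_c
-- ===== SOURCE A (Python) =====
-- def roll_c(data,di):
--     for i in range(len(data)):
--         for z in range(len(data[i])):
--             for j in range(len(data[i])):
--                 if(di == -1):
--                     try:
--                         if(data[i][j] == "O"  and data[i][j-di] == "." ):
--                             data[i][j] = "."
--
--                             data[i][j-di] = "O"
--                     except IndexError:
--                         continue
--                 else:
--                     try:
--                         if(data[i][j] == "O"  and j> 0 and data[i][j-di] == "." ):
--                             data[i][j] = "."
--
--                             data[i][j-di] = "O"
--                     except IndexError: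
--                         continue
--     return data
-- ===== SOURCE B (Python) =====
-- def roll_c(data, di):
--     # Settle 'O' rocks per row in one pass: count O's and .'s per segment
--     # between walls, then emit them settled (left for di==1, right for di==-1).
--     # Mutates the rows of `data` in place (like the original) and returns data.
--     if di == 0:
--         return data  # rolling by zero moves nothing
--     left = (di != -1)
--     for row in data:
--         new = []
--         cnt = 0   # O's in the current segment
--         sp = 0    # .'s in the current segment
--         for cell in row:
--             if cell == "O":
--                 cnt += 1
--             elif cell == ".":
--                 sp += 1
--             else:
--                 new.extend(["O"] * cnt + ["."] * sp if left else ["."] * sp + ["O"] * cnt)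
--                 new.append(cell)
--                 cnt = 0
--                 sp = 0
--         new.extend(["O"] * cnt + ["."] * sp if left else ["."] * sp + ["O"] * cnt)
--         row[:] = new
--     return data
-- ===== Notes on version B (the rewrite author's own statement) =====
-- stated objective: faster
-- what changed: A runs len(row) full bubble passes per row (each pass scanning the whole row, swapping one rock one cell at a time); B does a single counting pass per row, tallying O's and .'s in each wall-separated segment and emitting them settled, removing the quadratic-in-width pass loop.
-- outside the precondition, e.g. on roll_c([['O', 'O', '.']], 2): A returns [['O', '.', 'O']], B returns [['O', 'O', '.']]; on roll_c([['.', 'O', '.']], -2): A returns [['.', 'O', '.']], B returns [['O', '.', '.']]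
import Mathlib
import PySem

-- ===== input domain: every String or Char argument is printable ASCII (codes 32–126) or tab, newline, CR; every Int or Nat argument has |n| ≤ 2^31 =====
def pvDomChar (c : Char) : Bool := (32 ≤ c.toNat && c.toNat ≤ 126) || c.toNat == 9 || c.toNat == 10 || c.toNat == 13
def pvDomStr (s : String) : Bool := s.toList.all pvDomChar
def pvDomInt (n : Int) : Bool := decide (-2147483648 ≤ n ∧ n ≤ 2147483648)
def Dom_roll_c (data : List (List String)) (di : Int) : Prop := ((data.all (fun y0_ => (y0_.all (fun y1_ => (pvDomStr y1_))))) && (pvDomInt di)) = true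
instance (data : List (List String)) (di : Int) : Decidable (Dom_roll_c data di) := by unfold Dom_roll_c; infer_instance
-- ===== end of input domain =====

-- B replaces A's O(rows*m^2) bubble passes by one counting pass per row (O's and
-- '.'s per wall-separated segment, emitted settled); both A and B mutate the rows
-- of `data` in place in Python — the equivalence proved here is about the return value.

-- ===== PORT A =====
-- data[i][j] reads at indices produced by range(len(...)) are always in range in
-- Python, ported with pyGetD; the read data[i][j-di] is ported with pyGet?, whose
-- `none` models the caught IndexError (`continue` — same effect as a false condition).
def rollStep (di : Int) (row : List String) (j : Int) : List String :=
  if di == -1 then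
    match PySem.List.pyGet? row (j - di) with
    | none => row
    | some b =>
      if PySem.List.pyGetD row j "" == "O" && b == "." then
        PySem.List.pySetD (PySem.List.pySetD row j ".") (j - di) "O"
      else row
  else
    if PySem.List.pyGetD row j "" == "O" && decide (0 < j) then
      match PySem.List.pyGet? row (j - di) with
      | none => row
      | some b =>
        if b == "." then
          PySem.List.pySetD (PySem.List.pySetD row j ".") (j - di) "O"
        else row
    else row

def rollRow (di : Int) (row0 : List String) : List String :=
  (PySem.List.pyRange 0 (PySem.List.len row0) 1).foldl
    (fun row _z =>
      (PySem.List.pyRange 0 (PySem.List.len row) 1).foldl (fun r j => rollStep di r j) row)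
    row0

def roll_c (data : List (List String)) (di : Int) : List (List String) :=
  (PySem.List.pyRange 0 (PySem.List.len data) 1).foldl
    (fun d i => PySem.List.pySetD d i (rollRow di (PySem.List.pyGetD d i [])))
    data

-- ===== PORT B =====
def segOut (left : Bool) (cnt sp : Nat) : List String :=
  if left then List.replicate cnt "O" ++ List.replicate sp "."
  else List.replicate sp "." ++ List.replicate cnt "O"

def roll_c_alt (data : List (List String)) (di : Int) : List (List String) :=
  if di == 0 then data else
  let left := di != -1
  data.map (fun row =>
    let st := row.foldl
      (fun (st : List String × Nat × Nat) cell =>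
        if cell == "O" then (st.1, st.2.1 + 1, st.2.2)
        else if cell == "." then (st.1, st.2.1, st.2.2 + 1)
        else (st.1 ++ segOut left st.2.1 st.2.2 ++ [cell], 0, 0))
      ([], 0, 0)
    st.1 ++ segOut left st.2.1 st.2.2)

-- ===== PRECONDITION & SPEC =====
-- Pre_ restricts to the function's natural domain: a roll direction di of 1 (left),
-- -1 (right) or 0 (no movement) -- plus any di at all when every row lacks "O"
-- rocks or lacks "." gaps, since then nothing can move. For |di| >= 2 with a row
-- holding both rocks and gaps A still returns a value, but that value is an
-- accident of stepping rocks by |di| cells with Python's negative-index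
-- wraparound, which B does not reproduce.
def Pre_roll_c (data : List (List String)) (di : Int) : Prop :=
  di = 1 ∨ di = -1 ∨ di = 0 ∨ ∀ row ∈ data, "O" ∉ row ∨ "." ∉ row
instance (data : List (List String)) (di : Int) : Decidable (Pre_roll_c data di) := by
  unfold Pre_roll_c; infer_instance

def pvWitness_roll_c : List (List String) × Int := ([["O", ".", "#", ".", "O"], [".", "O"]], 1)

def Spec_roll_c (data : List (List String)) (di : Int) (out : List (List String)) : Prop := out = roll_c_alt data di
instance (data : List (List String)) (di : Int) (out : List (List String)) : Decidable (Spec_roll_c data di out) := by unfold Spec_roll_c; infer_instance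

-- ===== CLAIM (what is proved, stated in full; the proofs are below) =====
def Claim_equal_roll_c : Prop := ∀ (data : List (List String)) (di : Int), Dom_roll_c data di → Pre_roll_c data di → Spec_roll_c data di (roll_c data di)

-- ===== LEMMAS AND PROOFS =====

-- generic list helpers
theorem getD_append_len {α : Type} (pre : List α) (a : α) (rest : List α) (d : α) :
    (pre ++ a :: rest).getD pre.length d = a := by
  induction pre with
  | nil => rfl
  | cons x xs ih => simpa using ih

theorem set_append_len {α : Type} (pre : List α) (a : α) (rest : List α) (v : α) :
    (pre ++ a :: rest).set pre.length v = pre ++ v :: rest := by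
  induction pre with
  | nil => rfl
  | cons x xs ih => simpa using ih

theorem foldl_const_iterate {α : Type} (g : α → α) :
    ∀ (l : List Int) (x : α), l.foldl (fun r _ => g r) x = g^[l.length] x := by
  intro l
  induction l with
  | nil => intro x; rfl
  | cons a t ih =>
    intro x
    simp only [List.foldl_cons, List.length_cons, ih, Function.iterate_succ_apply]

-- one bubble pass, written structurally: carry `a` (the value now at position j-1
-- for the left direction / at position j for the right direction), and swap on the
-- adjacent pattern (p, q) ↦ (q, p).  For di = 1: p = ".", q = "O"; di = -1: p = "O", q = ".".
def bub (p q : String) : String → List String → List String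
  | a, [] => [a]
  | a, b :: r => if a == p && b == q then q :: bub p q p r else a :: bub p q b r

def bubPass (p q : String) : List String → List String
  | [] => []
  | a :: t => bub p q a t

-- the per-row spec both ports are reduced to: counts of q's and p's per segment
def gRowG (p q : String) : Nat → Nat → List String → List String
  | nq, np, [] => List.replicate nq q ++ List.replicate np p
  | nq, np, c :: t =>
    if c == q then gRowG p q (nq + 1) np t
    else if c == p then gRowG p q nq (np + 1) t
    else List.replicate nq q ++ List.replicate np p ++ c :: gRowG p q 0 0 t

-- run-length encoding of a wall-free (binary) stretch: q-runs separated by p's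
def tailDec (p q : String) : List Nat → List String
  | [] => []
  | c :: cs => p :: (List.replicate c q ++ tailDec p q cs)

def decode (p q : String) (c0 : Nat) (cs : List Nat) : List String :=
  List.replicate c0 q ++ tailDec p q cs

def encode (q : String) : List String → Nat × List Nat
  | [] => (0, [])
  | c :: t =>
    if c == q then ((encode q t).1 + 1, (encode q t).2)
    else (0, (encode q t).1 :: (encode q t).2)


theorem bub_repl (p q : String) (hpq : p ≠ q) :
    ∀ (k : Nat) (a : String) (t : List String), (a = p ∨ a = q) →
      bub p q a (List.replicate k q ++ t) = List.replicate k q ++ bub p q a t := by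
  intro k
  induction k with
  | zero => intro a t _; rfl
  | succ m ih =>
    intro a t ha
    rcases ha with h | h
    · rw [h]
      simp only [List.replicate_succ, List.cons_append, bub, beq_self_eq_true,
        Bool.and_self, Bool.true_and]
      rw [if_pos trivial, ih p t (Or.inl rfl)]
    · rw [h]
      have hf : (q == p) = false := by simp [Ne.symm hpq]
      simp only [List.replicate_succ, List.cons_append, bub, hf, Bool.false_and,
        if_neg Bool.false_ne_true]
      rw [ih q t (Or.inr rfl)]

theorem bub_tailDec (p q : String) (hpq : p ≠ q) :
    ∀ cs : List Nat, bub p q p (tailDec p q cs) = tailDec p q cs ++ [p] := by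
  intro cs
  induction cs with
  | nil => rfl
  | cons c cs ih =>
    simp [tailDec, bub, hpq, bub_repl p q hpq c p _ (Or.inl rfl), ih]

theorem tailDec_append_zero (p q : String) (cs : List Nat) :
    tailDec p q (cs ++ [0]) = tailDec p q cs ++ [p] := by
  induction cs with
  | nil => rfl
  | cons c cs ih => simp [tailDec, ih]

theorem bubPass_decode_cons (p q : String) (hpq : p ≠ q) (c0 c1 : Nat) (cs : List Nat) :
    bubPass p q (decode p q c0 (c1 :: cs)) = decode p q (c0 + c1) (cs ++ [0]) := by
  cases c0 with
  | zero =>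
    simp only [decode, List.replicate_zero, List.nil_append, tailDec, bubPass,
      tailDec_append_zero]
    rw [bub_repl p q hpq c1 p _ (Or.inl rfl), bub_tailDec p q hpq]
    simp
  | succ k =>
    simp only [decode, List.replicate_succ, List.cons_append, bubPass, tailDec]
    rw [bub_repl p q hpq k q _ (Or.inr rfl)]
    have h1 : bub p q q (p :: (List.replicate c1 q ++ tailDec p q cs))
        = q :: (List.replicate c1 q ++ (tailDec p q cs ++ [p])) := by
      have hf : (q == p) = false := by simp [Ne.symm hpq]
      simp only [bub, hf, Bool.false_and, if_neg Bool.false_ne_true]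
      rw [bub_repl p q hpq c1 p _ (Or.inl rfl), bub_tailDec p q hpq]
    rw [h1, tailDec_append_zero]
    have h2 : List.replicate (k + 1 + c1) q
        = List.replicate k q ++ q :: List.replicate c1 q := by
      rw [show k + 1 + c1 = k + (c1 + 1) by omega, List.replicate_add,
        List.replicate_succ]
    simp [h2]

theorem bubPass_decode_nil (p q : String) (hpq : p ≠ q) (c0 : Nat) :
    bubPass p q (decode p q c0 []) = decode p q c0 [] := by
  cases c0 with
  | zero => rfl
  | succ k =>
    simp only [decode, tailDec, List.append_nil, List.replicate_succ, bubPass]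
    rw [show List.replicate k q = List.replicate k q ++ ([] : List String) by simp,
      bub_repl p q hpq k q [] (Or.inr rfl)]
    simp only [bub, List.append_nil]
    rw [← List.replicate_succ', List.replicate_succ]

theorem bubPass_form (p q : String) (hpq : p ≠ q) :
    ∀ (j c0 : Nat) (cs : List Nat), j ≤ cs.length →
      (bubPass p q)^[j] (decode p q c0 cs)
        = decode p q (c0 + (cs.take j).sum) (cs.drop j ++ List.replicate j 0) := by
  intro j
  induction j with
  | zero => intro c0 cs _; simp
  | succ m ih =>
    intro c0 cs h
    cases cs with
    | nil => simp at h
    | cons c1 cs' =>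
      have hm : m ≤ cs'.length := by simpa using h
      rw [Function.iterate_succ_apply, bubPass_decode_cons p q hpq,
        ih _ _ (by simp; omega)]
      rw [List.take_append_of_le_length hm, List.drop_append_of_le_length hm]
      simp only [List.take_succ_cons, List.drop_succ_cons, List.sum_cons,
        List.append_assoc, List.replicate_succ, List.singleton_append]
      congr 1
      omega

theorem decode_settled_fixed (p q : String) (hpq : p ≠ q) (C m : Nat) :
    bubPass p q (decode p q C (List.replicate m 0)) = decode p q C (List.replicate m 0) := by
  cases m with
  | zero => exact bubPass_decode_nil p q hpq C
  | succ m' =>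
    rw [List.replicate_succ, bubPass_decode_cons p q hpq, ← List.replicate_succ']
    simp [List.replicate_succ]

theorem bubPass_iter_decode (p q : String) (hpq : p ≠ q) (k c0 : Nat) (cs : List Nat)
    (h : cs.length ≤ k) :
    (bubPass p q)^[k] (decode p q c0 cs)
      = decode p q (c0 + cs.sum) (List.replicate cs.length 0) := by
  rw [show k = (k - cs.length) + cs.length by omega, Function.iterate_add_apply,
    bubPass_form p q hpq cs.length c0 cs le_rfl, List.take_length, List.drop_length,
    List.nil_append]
  exact Function.iterate_fixed (decode_settled_fixed p q hpq _ _) _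

theorem count_tailDec_q (p q : String) (hpq : p ≠ q) (cs : List Nat) :
    (tailDec p q cs).count q = cs.sum := by
  induction cs with
  | nil => rfl
  | cons c cs ih => simp [tailDec, List.count_cons, ih, hpq, List.count_replicate]

theorem count_tailDec_p (p q : String) (hpq : p ≠ q) (cs : List Nat) :
    (tailDec p q cs).count p = cs.length := by
  induction cs with
  | nil => rfl
  | cons c cs ih =>
    simp [tailDec, List.count_cons, ih, Ne.symm hpq, List.count_replicate]

theorem count_decode_q (p q : String) (hpq : p ≠ q) (c0 : Nat) (cs : List Nat) :
    (decode p q c0 cs).count q = c0 + cs.sum := by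
  simp [decode, List.count_replicate, count_tailDec_q p q hpq]

theorem count_decode_p (p q : String) (hpq : p ≠ q) (c0 : Nat) (cs : List Nat) :
    (decode p q c0 cs).count p = cs.length := by
  simp [decode, List.count_replicate, Ne.symm hpq, count_tailDec_p p q hpq]

theorem decode_encode (p q : String) (hpq : p ≠ q) :
    ∀ s : List String, (∀ c ∈ s, c = p ∨ c = q) →
      decode p q (encode q s).1 (encode q s).2 = s := by
  intro s
  induction s with
  | nil => intro _; rfl
  | cons c t ih =>
    intro h
    have ht := ih (fun x hx => h x (List.mem_cons_of_mem _ hx))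
    rcases h c (by simp) with hc | hc
    · subst hc
      have hbf : (c == q) = false := by simp [hpq]
      simp only [encode, hbf, if_neg Bool.false_ne_true]
      simp only [decode, List.replicate_zero, List.nil_append, tailDec]
      simp only [decode] at ht
      exact congrArg (c :: ·) ht
    · subst hc
      simp only [encode, beq_self_eq_true, if_pos rfl]
      simp only [decode, List.replicate_succ, List.cons_append]
      simp only [decode] at ht
      exact congrArg (c :: ·) ht

theorem tailDec_replicate_zero (p q : String) (m : Nat) :
    tailDec p q (List.replicate m 0) = List.replicate m p := by
  induction m with
  | zero => rfl
  | succ k ih => simp [List.replicate_succ, tailDec, ih]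

theorem bubPass_seg (p q : String) (hpq : p ≠ q) (s : List String) (n : Nat)
    (hb : ∀ c ∈ s, c = p ∨ c = q) (hn : s.length ≤ n) :
    (bubPass p q)^[n] s = List.replicate (s.count q) q ++ List.replicate (s.count p) p := by
  have he := decode_encode p q hpq s hb
  have hlen : (encode q s).2.length ≤ n := by
    have h1 : (decode p q (encode q s).1 (encode q s).2).count p = (encode q s).2.length :=
      count_decode_p p q hpq _ _
    rw [he] at h1
    calc (encode q s).2.length = s.count p := h1.symm
      _ ≤ s.length := List.count_le_length
      _ ≤ n := hn
  conv_lhs => rw [← he]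
  rw [bubPass_iter_decode p q hpq n _ _ hlen]
  have hq : s.count q = (encode q s).1 + (encode q s).2.sum := by
    conv_lhs => rw [← he]
    exact count_decode_q p q hpq _ _
  have hp : s.count p = (encode q s).2.length := by
    conv_lhs => rw [← he]
    exact count_decode_p p q hpq _ _
  rw [decode, tailDec_replicate_zero, hq, hp]

theorem bub_binary (p q : String) :
    ∀ (t : List String) (a : String), (a = p ∨ a = q) → (∀ c ∈ t, c = p ∨ c = q) →
      ∀ x ∈ bub p q a t, x = p ∨ x = q := by
  intro t
  induction t with
  | nil => intro a ha _ x hx; simp only [bub, List.mem_singleton] at hx; subst hx; exact ha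
  | cons b r ih =>
    intro a ha hb x hx
    simp only [bub] at hx
    split at hx
    · rcases List.mem_cons.mp hx with h | h
      · exact h ▸ Or.inr rfl
      · exact ih p (Or.inl rfl) (fun c hc => hb c (List.mem_cons_of_mem _ hc)) x h
    · rcases List.mem_cons.mp hx with h | h
      · exact h ▸ ha
      · exact ih b (hb b (by simp)) (fun c hc => hb c (List.mem_cons_of_mem _ hc)) x h

theorem bubPass_binary (p q : String) (s : List String) (hb : ∀ c ∈ s, c = p ∨ c = q) :
    ∀ x ∈ bubPass p q s, x = p ∨ x = q := by
  cases s with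
  | nil => intro x hx; simp [bubPass] at hx
  | cons a t =>
    exact bub_binary p q t a (hb a (by simp))
      (fun c hc => hb c (List.mem_cons_of_mem _ hc))

theorem bub_wall (p q w : String) (hwp : w ≠ p) (hwq : w ≠ q) :
    ∀ (t : List String) (a : String) (rest : List String),
      (a = p ∨ a = q) → (∀ c ∈ t, c = p ∨ c = q) →
      bub p q a (t ++ w :: rest) = bub p q a t ++ w :: bubPass p q rest := by
  intro t
  induction t with
  | nil =>
    intro a rest ha _
    have h1 : (w == q) = false := by simp [hwq]
    have h2 : (w == p) = false := by simp [hwp]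
    cases rest with
    | nil => simp [bub, bubPass, h1, h2]
    | cons b r => simp [bub, bubPass, h1, h2]
  | cons b r ih =>
    intro a rest ha hb
    simp only [List.cons_append, bub]
    split
    · rw [ih p rest (Or.inl rfl) (fun c hc => hb c (List.mem_cons_of_mem _ hc))]
      rfl
    · rw [ih b rest (hb b (by simp)) (fun c hc => hb c (List.mem_cons_of_mem _ hc))]
      rfl

theorem bubPass_wall (p q w : String) (hwp : w ≠ p) (hwq : w ≠ q)
    (s rest : List String) (hb : ∀ c ∈ s, c = p ∨ c = q) :
    bubPass p q (s ++ w :: rest) = bubPass p q s ++ w :: bubPass p q rest := by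
  cases s with
  | nil =>
    have h1 : (w == q) = false := by simp [hwq]
    have h2 : (w == p) = false := by simp [hwp]
    cases rest with
    | nil => simp [bub, bubPass]
    | cons b r => simp [bub, bubPass, h1, h2]
  | cons a t =>
    exact bub_wall p q w hwp hwq t a rest (hb a (by simp))
      (fun c hc => hb c (List.mem_cons_of_mem _ hc))

theorem bubPass_iter_wall (p q w : String) (hwp : w ≠ p) (hwq : w ≠ q) :
    ∀ (n : Nat) (s rest : List String), (∀ c ∈ s, c = p ∨ c = q) →
      (bubPass p q)^[n] (s ++ w :: rest)
        = (bubPass p q)^[n] s ++ w :: (bubPass p q)^[n] rest := by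
  intro n
  induction n with
  | zero => intro s rest _; rfl
  | succ m ih =>
    intro s rest hb
    rw [Function.iterate_succ_apply, Function.iterate_succ_apply,
      Function.iterate_succ_apply, bubPass_wall p q w hwp hwq s rest hb,
      ih _ _ (bubPass_binary p q s hb)]

theorem gRowG_prefix (p q : String) (hpq : p ≠ q) :
    ∀ (s z : List String) (nq np : Nat), (∀ c ∈ s, c = p ∨ c = q) →
      gRowG p q nq np (s ++ z) = gRowG p q (nq + s.count q) (np + s.count p) z := by
  intro s
  induction s with
  | nil => intro z nq np _; simp
  | cons c t ih =>
    intro z nq np hb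
    have ht := fun x hx => hb x (List.mem_cons_of_mem _ hx)
    rcases hb c (by simp) with hc | hc
    · have h1 : (c == q) = false := by simp [hc, hpq]
      have h2 : (c == p) = true := by simp [hc]
      simp only [List.cons_append, gRowG, h1, h2, if_neg Bool.false_ne_true, if_pos rfl]
      rw [if_pos trivial, ih z nq (np + 1) ht]
      have e1 : (c :: t).count q = t.count q := by simp [List.count_cons, h1]
      have e2 : (c :: t).count p = t.count p + 1 := by simp [List.count_cons, h2]
      rw [e1, e2, show np + 1 + t.count p = np + (t.count p + 1) by omega]
    · have h1 : (c == q) = true := by simp [hc]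
      simp only [List.cons_append, gRowG, h1, if_pos rfl]
      rw [if_pos trivial, ih z (nq + 1) np ht]
      have h2 : (c == p) = false := by simp [hc, Ne.symm hpq]
      have e1 : (c :: t).count q = t.count q + 1 := by simp [List.count_cons, h1]
      have e2 : (c :: t).count p = t.count p := by simp [List.count_cons, h2]
      rw [e1, e2, show nq + 1 + t.count q = nq + (t.count q + 1) by omega]

theorem gRowG_binary (p q : String) (hpq : p ≠ q) (s : List String)
    (hb : ∀ c ∈ s, c = p ∨ c = q) :
    gRowG p q 0 0 s = List.replicate (s.count q) q ++ List.replicate (s.count p) p := by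
  have := gRowG_prefix p q hpq s [] 0 0 hb
  simpa [gRowG] using this

theorem gRowG_wall (p q w : String) (hwp : w ≠ p) (hwq : w ≠ q) (nq np : Nat)
    (rest : List String) :
    gRowG p q nq np (w :: rest)
      = List.replicate nq q ++ List.replicate np p ++ w :: gRowG p q 0 0 rest := by
  have h1 : (w == q) = false := by simp [hwq]
  have h2 : (w == p) = false := by simp [hwp]
  simp [gRowG, h1, h2]

theorem dropWhile_head_false {α : Type} (P : α → Bool) :
    ∀ (l : List α) (w : α) (rest : List α), l.dropWhile P = w :: rest → P w = false := by
  intro l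
  induction l with
  | nil => intro w rest h; simp [List.dropWhile] at h
  | cons c t ih =>
    intro w rest h
    rw [List.dropWhile_cons] at h
    split at h
    · exact ih w rest h
    · rename_i hc
      cases h
      simpa using hc

theorem bubPass_iter_gRowG (p q : String) (hpq : p ≠ q) :
    ∀ (N : Nat) (row : List String) (n : Nat), row.length ≤ N → row.length ≤ n →
      (bubPass p q)^[n] row = gRowG p q 0 0 row := by
  intro N
  induction N with
  | zero =>
    intro row n hN _
    have : row = [] := List.eq_nil_of_length_eq_zero (Nat.le_zero.mp hN)
    subst this
    rw [Function.iterate_fixed (by rfl : bubPass p q [] = [])]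
    simp [gRowG]
  | succ M ih =>
    intro row n hN hn
    set P : String → Bool := fun c => c == p || c == q with hP
    have hsplit : row.takeWhile P ++ row.dropWhile P = row := List.takeWhile_append_dropWhile
    have hsbin : ∀ c ∈ row.takeWhile P, c = p ∨ c = q := by
      intro c hc
      have := List.mem_takeWhile_imp hc
      simpa [hP] using this
    have hslen : (row.takeWhile P).length ≤ row.length := by
      conv_rhs => rw [← hsplit]
      rw [List.length_append]
      omega
    cases hdrop : row.dropWhile P with
    | nil =>
      have hrow : row.takeWhile P = row := by
        have h0 := hsplit
        rw [hdrop, List.append_nil] at h0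
        exact h0
      have hb : ∀ c ∈ row, c = p ∨ c = q := by rw [← hrow]; exact hsbin
      rw [bubPass_seg p q hpq row n hb hn, gRowG_binary p q hpq row hb]
    | cons w rest =>
      have hw : P w = false := dropWhile_head_false P row w rest hdrop
      have hwp : w ≠ p := by
        intro h; subst h; simp [hP] at hw
      have hwq : w ≠ q := by
        intro h; subst h; simp [hP] at hw
      have hlen : row.length = (row.takeWhile P).length + rest.length + 1 := by
        conv_lhs => rw [← hsplit, hdrop]
        simp
        omega
      conv_lhs => rw [← hsplit, hdrop]
      rw [bubPass_iter_wall p q w hwp hwq n _ rest hsbin,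
        bubPass_seg p q hpq _ n hsbin (le_trans hslen hn),
        ih rest n (by omega) (by omega)]
      conv_rhs => rw [← hsplit, hdrop]
      rw [gRowG_prefix p q hpq _ _ 0 0 hsbin, gRowG_wall p q w hwp hwq,
        List.append_assoc]
      simp

theorem foldAR (n : Nat) : ∀ (tail pre : List String), tail.length = n →
    (PySem.List.pyRange (pre.length : Int) ((pre.length : Int) + (tail.length : Int)) 1).foldl
      (fun r j => rollStep (-1) r j) (pre ++ tail)
    = pre ++ bubPass "O" "." tail := by
  induction n with
  | zero =>
    intro tail pre h
    have ht : tail = [] := List.eq_nil_of_length_eq_zero h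
    subst ht
    simp [PySem.List.pyRange_one_eq_nil, bubPass]
  | succ m ih =>
    intro tail pre h
    match tail with
    | a :: t =>
      rw [PySem.List.pyRange_one_cons (by push_cast; omega), List.foldl_cons]
      have hget : PySem.List.pyGetD (pre ++ a :: t) (pre.length : Int) "" = a := by
        rw [PySem.List.pyGetD_natCast]; exact getD_append_len pre a t ""
      cases t with
      | nil =>
        have hnone : PySem.List.pyGet? (pre ++ [a]) ((pre.length : Int) - (-1)) = none := by
          rw [show (pre.length : Int) - (-1) = ((pre.length + 1 : Nat) : Int) by push_cast; ring,
            PySem.List.pyGet?_natCast]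
          apply List.getElem?_eq_none
          simp
        have hstep : rollStep (-1) (pre ++ [a]) (pre.length : Int) = pre ++ [a] := by
          unfold rollStep
          rw [if_pos (by decide), hnone]
        rw [hstep]
        simp [PySem.List.pyRange_one_eq_nil, bubPass, bub]
      | cons b r =>
        have hsome : PySem.List.pyGet? (pre ++ a :: b :: r) ((pre.length : Int) - (-1)) = some b := by
          rw [show pre ++ a :: b :: r = (pre ++ [a]) ++ b :: r by simp,
            show (pre.length : Int) - (-1) = ((pre ++ [a]).length : Int) by simp,
            PySem.List.pyGet?_append_length]
        have hlen_t : (b :: r).length = m := by simpa using h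
        have hlen_o : ("O" :: r).length = m := by simpa using hlen_t
        cases hcond : (a == "O" && b == ".") with
        | true =>
          have hstep : rollStep (-1) (pre ++ a :: b :: r) (pre.length : Int)
              = (pre ++ ["."]) ++ "O" :: r := by
            unfold rollStep
            rw [if_pos (by decide), hsome]
            dsimp only
            rw [hget, if_pos hcond]
            rw [PySem.List.pySetD_natCast, set_append_len,
              show (pre.length : Int) - (-1) = (((pre ++ ["."]).length : Nat) : Int) by simp,
              show pre ++ "." :: b :: r = (pre ++ ["."]) ++ b :: r by simp,
              PySem.List.pySetD_natCast, set_append_len]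
          rw [hstep]
          rw [show (pre.length : Int) + 1 = (((pre ++ ["."]).length : Nat) : Int) by simp,
            show (pre.length : Int) + ((a :: b :: r).length : Int)
              = (((pre ++ ["."]).length : Nat) : Int) + ((("O" :: r).length : Nat) : Int) by
              push_cast; simp; ring]
          rw [ih ("O" :: r) (pre ++ ["."]) hlen_o]
          simp [bubPass, bub, hcond]
        | false =>
          have hstep : rollStep (-1) (pre ++ a :: b :: r) (pre.length : Int)
              = pre ++ a :: b :: r := by
            unfold rollStep
            rw [if_pos (by decide), hsome]
            dsimp only
            rw [hget, if_neg (by simp [hcond])]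
          rw [hstep]
          rw [show (pre.length : Int) + 1 = (((pre ++ [a]).length : Nat) : Int) by simp,
            show (pre.length : Int) + ((a :: b :: r).length : Int)
              = (((pre ++ [a]).length : Nat) : Int) + (((b :: r).length : Nat) : Int) by
              push_cast; simp; ring,
            show pre ++ a :: b :: r = (pre ++ [a]) ++ b :: r by simp]
          rw [ih (b :: r) (pre ++ [a]) hlen_t]
          simp [bubPass, bub, hcond]

theorem foldAL (n : Nat) : ∀ (tail pre : List String) (a : String), tail.length = n →
    (PySem.List.pyRange ((pre.length : Int) + 1) ((pre.length : Int) + 1 + (tail.length : Int)) 1).foldl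
      (fun r j => rollStep 1 r j) (pre ++ a :: tail)
    = pre ++ bub "." "O" a tail := by
  induction n with
  | zero =>
    intro tail pre a h
    have ht : tail = [] := List.eq_nil_of_length_eq_zero h
    subst ht
    simp [PySem.List.pyRange_one_eq_nil, bub]
  | succ m ih =>
    intro tail pre a h
    match tail with
    | b :: r =>
      rw [PySem.List.pyRange_one_cons (by push_cast; omega), List.foldl_cons]
      have hgetb : PySem.List.pyGetD (pre ++ a :: b :: r) ((pre.length : Int) + 1) "" = b := by
        rw [show pre ++ a :: b :: r = (pre ++ [a]) ++ b :: r by simp,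
          show (pre.length : Int) + 1 = (((pre ++ [a]).length : Nat) : Int) by simp,
          PySem.List.pyGetD_natCast]
        exact getD_append_len (pre ++ [a]) b r ""
      have hgeta : PySem.List.pyGet? (pre ++ a :: b :: r) ((pre.length : Int) + 1 - 1)
          = some a := by
        rw [show (pre.length : Int) + 1 - 1 = (pre.length : Int) by ring,
          PySem.List.pyGet?_append_length]
      have hpos : (decide ((0 : Int) < (pre.length : Int) + 1)) = true := by
        simp
      have hlen_r : r.length = m := by simpa using h
      have hbounds1 : (pre.length : Int) + 1 + 1 = (((pre ++ [a]).length : Nat) : Int) + 1 := by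
        simp
      have hbounds1' : (pre.length : Int) + 1 + 1 = (((pre ++ ["O"]).length : Nat) : Int) + 1 := by
        simp
      have hbounds2 : ∀ c : String, (pre.length : Int) + 1 + ((b :: r).length : Int)
          = (((pre ++ [c]).length : Nat) : Int) + 1 + ((r.length : Nat) : Int) := by
        intro c; push_cast; simp; ring
      cases hb : (b == "O") with
      | false =>
        have hstep : rollStep 1 (pre ++ a :: b :: r) ((pre.length : Int) + 1)
            = pre ++ a :: b :: r := by
          unfold rollStep
          rw [if_neg (by decide), hgetb, if_neg (by simp [hb])]
        rw [hstep, hbounds1, hbounds2 a,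
          show pre ++ a :: b :: r = (pre ++ [a]) ++ b :: r by simp,
          ih r (pre ++ [a]) b hlen_r]
        simp [bub, hb]
      | true =>
        cases ha : (a == ".") with
        | false =>
          have hstep : rollStep 1 (pre ++ a :: b :: r) ((pre.length : Int) + 1)
              = pre ++ a :: b :: r := by
            unfold rollStep
            rw [if_neg (by decide), hgetb, if_pos (by simp [hb, hpos]), hgeta]
            dsimp only
            rw [if_neg (by simp [ha])]
          rw [hstep, hbounds1, hbounds2 a,
            show pre ++ a :: b :: r = (pre ++ [a]) ++ b :: r by simp,
            ih r (pre ++ [a]) b hlen_r]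
          simp [bub, ha]
        | true =>
          have hstep : rollStep 1 (pre ++ a :: b :: r) ((pre.length : Int) + 1)
              = (pre ++ ["O"]) ++ "." :: r := by
            unfold rollStep
            rw [if_neg (by decide), hgetb, if_pos (by simp [hb, hpos]), hgeta]
            dsimp only
            rw [if_pos (by simpa using ha)]
            rw [show pre ++ a :: b :: r = (pre ++ [a]) ++ b :: r by simp,
              show (pre.length : Int) + 1 = (((pre ++ [a]).length : Nat) : Int) by simp,
              PySem.List.pySetD_natCast, set_append_len,
              show (pre ++ [a]) ++ "." :: r = pre ++ a :: "." :: r by simp,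
              show (((pre ++ [a]).length : Nat) : Int) - 1 = (pre.length : Int) by simp,
              PySem.List.pySetD_natCast, set_append_len]
            have ha' : a = "." := by simpa using ha
            simp [ha']
          rw [hstep, hbounds1', hbounds2 "O", ih r (pre ++ ["O"]) "." hlen_r]
          simp [bub, ha, hb]

theorem passA_neg (row : List String) :
    (PySem.List.pyRange 0 (PySem.List.len row) 1).foldl (fun r j => rollStep (-1) r j) row
      = bubPass "O" "." row := by
  have h := foldAR row.length row [] rfl
  simpa using h

theorem passA_one (row : List String) :
    (PySem.List.pyRange 0 (PySem.List.len row) 1).foldl (fun r j => rollStep 1 r j) row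
      = bubPass "." "O" row := by
  cases row with
  | nil => simp [PySem.List.pyRange_one_eq_nil, bubPass]
  | cons a t =>
    rw [PySem.List.pyRange_one_cons (by simp only [PySem.List.len_eq, List.length_cons]; push_cast; omega), List.foldl_cons]
    have hstep : rollStep 1 (a :: t) 0 = a :: t := by
      unfold rollStep
      rw [if_neg (by decide)]
      simp
    rw [hstep]
    have h := foldAL t.length t [] a rfl
    simp only [List.length_nil, Nat.cast_zero, zero_add, List.nil_append] at h
    rw [show (1 : Int) + (t.length : Int) = (t.length : Int) + 1 by ring] at h
    simpa [bubPass] using h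

theorem rollRow_eq (di : Int) (p q : String)
    (hpass : ∀ row : List String,
      (PySem.List.pyRange 0 (PySem.List.len row) 1).foldl (fun r j => rollStep di r j) row
        = bubPass p q row)
    (row : List String) : rollRow di row = (bubPass p q)^[row.length] row := by
  unfold rollRow
  have hfun : (fun (row : List String) (_z : Int) =>
      (PySem.List.pyRange 0 (PySem.List.len row) 1).foldl (fun r j => rollStep di r j) row)
      = fun row _z => bubPass p q row := by
    funext r z
    exact hpass r
  rw [hfun, foldl_const_iterate]
  congr 1
  simp [PySem.List.length_pyRange_one]

theorem rowA_spec (di : Int) (p q : String) (hpq : p ≠ q)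
    (hpass : ∀ row : List String,
      (PySem.List.pyRange 0 (PySem.List.len row) 1).foldl (fun r j => rollStep di r j) row
        = bubPass p q row)
    (row : List String) : rollRow di row = gRowG p q 0 0 row := by
  rw [rollRow_eq di p q hpass row]
  exact bubPass_iter_gRowG p q hpq row.length row row.length le_rfl le_rfl

theorem outer_fold (g : List String → List String) :
    ∀ (tail pre : List (List String)),
      (PySem.List.pyRange (pre.length : Int) ((pre.length : Int) + (tail.length : Int)) 1).foldl
        (fun d i => PySem.List.pySetD d i (g (PySem.List.pyGetD d i []))) (pre ++ tail)
      = pre ++ tail.map g := by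
  intro tail
  induction tail with
  | nil => intro pre; simp [PySem.List.pyRange_one_eq_nil]
  | cons a t ih =>
    intro pre
    rw [PySem.List.pyRange_one_cons (by simp only [List.length_cons]; push_cast; omega),
      List.foldl_cons]
    have h1 : PySem.List.pyGetD (pre ++ a :: t) (pre.length : Int) ([] : List String) = a := by
      rw [PySem.List.pyGetD_natCast]; exact getD_append_len pre a t []
    rw [h1, PySem.List.pySetD_natCast, set_append_len,
      show (pre.length : Int) + 1 = (((pre ++ [g a]).length : Nat) : Int) by simp,
      show (pre.length : Int) + ((a :: t).length : Int)
        = (((pre ++ [g a]).length : Nat) : Int) + ((t.length : Nat) : Int) by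
        push_cast; simp; ring,
      show pre ++ g a :: t = (pre ++ [g a]) ++ t by simp,
      ih (pre ++ [g a])]
    simp

theorem roll_c_eq_map (di : Int) (data : List (List String)) :
    roll_c data di = data.map (rollRow di) := by
  unfold roll_c
  have h := outer_fold (rollRow di) data []
  simpa using h

def bfin (left : Bool) (st : List String × Nat × Nat) : List String :=
  st.1 ++ segOut left st.2.1 st.2.2

def bstep (left : Bool) (st : List String × Nat × Nat) (cell : String) :
    List String × Nat × Nat :=
  if cell == "O" then (st.1, st.2.1 + 1, st.2.2)
  else if cell == "." then (st.1, st.2.1, st.2.2 + 1)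
  else (st.1 ++ segOut left st.2.1 st.2.2 ++ [cell], 0, 0)

theorem bfold_left (row : List String) : ∀ acc : List String × Nat × Nat,
    bfin true (row.foldl (bstep true) acc)
      = acc.1 ++ gRowG "." "O" acc.2.1 acc.2.2 row := by
  induction row with
  | nil => intro acc; simp [bfin, segOut, gRowG]
  | cons c t ih =>
    intro acc
    rw [List.foldl_cons]
    by_cases hc1 : c = "O"
    · subst hc1; simp [bstep, ih, gRowG]
    · by_cases hc2 : c = "."
      · subst hc2; simp [bstep, ih, gRowG]
      · have h1 : (c == "O") = false := by simp [hc1]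
        have h2 : (c == ".") = false := by simp [hc2]
        simp [bstep, ih, gRowG, h1, h2, segOut, List.append_assoc]

theorem bfold_right (row : List String) : ∀ acc : List String × Nat × Nat,
    bfin false (row.foldl (bstep false) acc)
      = acc.1 ++ gRowG "O" "." acc.2.2 acc.2.1 row := by
  induction row with
  | nil => intro acc; simp [bfin, segOut, gRowG]
  | cons c t ih =>
    intro acc
    rw [List.foldl_cons]
    by_cases hc1 : c = "O"
    · subst hc1; simp [bstep, ih, gRowG]
    · by_cases hc2 : c = "."
      · subst hc2; simp [bstep, ih, gRowG]
      · have h1 : (c == "O") = false := by simp [hc1]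
        have h2 : (c == ".") = false := by simp [hc2]
        simp [bstep, ih, gRowG, h1, h2, segOut, List.append_assoc]

theorem pyGetD_of_pyGet?_some (row : List String) (j : Int) (b : String)
    (h : PySem.List.pyGet? row j = some b) : PySem.List.pyGetD row j "" = b := by
  simp [PySem.List.pyGetD, h]

theorem rollStep_zero (row : List String) (j : Int) : rollStep 0 row j = row := by
  unfold rollStep
  rw [if_neg (by decide)]
  by_cases hc : (PySem.List.pyGetD row j "" == "O" && decide (0 < j)) = true
  · rw [if_pos hc]
    have hO : PySem.List.pyGetD row j "" = "O" := by
      have h1 := ((Bool.and_eq_true _ _).mp hc).1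
      simpa using h1
    cases h : PySem.List.pyGet? row (j - 0) with
    | none => rfl
    | some b =>
      have hb : b = "O" := by
        have hj : j - 0 = j := by ring
        rw [hj] at h
        rw [pyGetD_of_pyGet?_some row j b h] at hO
        exact hO
      dsimp only
      rw [if_neg (by simp [hb])]
  · rw [if_neg hc]

theorem rollRow_zero (row : List String) : rollRow 0 row = row := by
  unfold rollRow
  have hinner : ∀ r : List String,
      (PySem.List.pyRange 0 (PySem.List.len r) 1).foldl (fun r j => rollStep 0 r j) r = r := by
    intro r
    have : ∀ (l : List Int) (x : List String),
        l.foldl (fun r j => rollStep 0 r j) x = x := by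
      intro l
      induction l with
      | nil => intro x; rfl
      | cons a t ih => intro x; rw [List.foldl_cons, rollStep_zero]; exact ih x
    exact this _ r
  have : ∀ (l : List Int) (x : List String),
      l.foldl (fun row _z =>
        (PySem.List.pyRange 0 (PySem.List.len row) 1).foldl (fun r j => rollStep 0 r j) row) x
      = x := by
    intro l
    induction l with
    | nil => intro x; rfl
    | cons a t ih => intro x; rw [List.foldl_cons, hinner]; exact ih x
  exact this _ row

theorem foldl_fixed_on {α β : Type} (f : α → β → α) (x : α) (h : ∀ y, f x y = x) :
    ∀ l : List β, l.foldl f x = x := by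
  intro l
  induction l with
  | nil => rfl
  | cons a t ih => rw [List.foldl_cons, h a, ih]

theorem rollStep_noO (di : Int) (row : List String) (j : Int) (h : "O" ∉ row) :
    rollStep di row j = row := by
  have hget : (PySem.List.pyGetD row j "" == "O") = false := by
    cases hg : PySem.List.pyGet? row j with
    | none => simp [PySem.List.pyGetD, hg]
    | some b =>
      have hb : b ∈ row := by
        apply PySem.List.mem_of_pyGet?_eq_some
        exact hg
      have : b ≠ "O" := fun hbo => h (hbo ▸ hb)
      simp [PySem.List.pyGetD, hg, this]
  unfold rollStep
  split
  · cases hg : PySem.List.pyGet? row (j - di) with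
    | none => rfl
    | some b => dsimp only; rw [if_neg (by simp [hget])]
  · rw [if_neg (by simp [hget])]

theorem rollRow_noO (di : Int) (row : List String) (h : "O" ∉ row) :
    rollRow di row = row := by
  unfold rollRow
  refine foldl_fixed_on
      (fun (r0 : List String) (_z : Int) =>
        (PySem.List.pyRange 0 (PySem.List.len r0) 1).foldl (fun r j => rollStep di r j) r0)
      row (fun _z => ?_) _
  exact foldl_fixed_on _ row (fun j => rollStep_noO di row j h) _

theorem gRowG_noO_left (row : List String) (h : "O" ∉ row) :
    ∀ np : Nat, gRowG "." "O" 0 np row = List.replicate np "." ++ row := by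
  induction row with
  | nil => intro np; simp [gRowG]
  | cons c t ih =>
    intro np
    have hcO : (c == "O") = false := by
      simp only [beq_eq_false_iff_ne, ne_eq]
      intro hc; exact h (hc ▸ List.mem_cons_self)
    have ht : "O" ∉ t := fun hm => h (List.mem_cons_of_mem _ hm)
    by_cases hcd : c = "."
    · subst hcd
      simp only [gRowG, hcO, if_neg Bool.false_ne_true, beq_self_eq_true, if_pos rfl]
      rw [if_pos trivial, ih ht (np + 1), List.replicate_succ']
      simp
    · have hcd' : (c == ".") = false := by simp [hcd]
      simp only [gRowG, hcO, hcd', if_neg Bool.false_ne_true]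
      rw [ih ht 0]
      simp

theorem gRowG_noO_right (row : List String) (h : "O" ∉ row) :
    ∀ nq : Nat, gRowG "O" "." nq 0 row = List.replicate nq "." ++ row := by
  induction row with
  | nil => intro nq; simp [gRowG]
  | cons c t ih =>
    intro nq
    have hcO : (c == "O") = false := by
      simp only [beq_eq_false_iff_ne, ne_eq]
      intro hc; exact h (hc ▸ List.mem_cons_self)
    have ht : "O" ∉ t := fun hm => h (List.mem_cons_of_mem _ hm)
    by_cases hcd : c = "."
    · subst hcd
      simp only [gRowG, beq_self_eq_true, if_pos rfl]
      rw [if_pos trivial, ih ht (nq + 1), List.replicate_succ']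
      simp
    · have hcd' : (c == ".") = false := by simp [hcd]
      simp only [gRowG, hcO, hcd', if_neg Bool.false_ne_true]
      rw [ih ht 0]
      simp

theorem bfin_noO (left : Bool) (row : List String) (h : "O" ∉ row) :
    bfin left (row.foldl (bstep left) ([], 0, 0)) = row := by
  cases left with
  | true => rw [bfold_left row ([], 0, 0)]; simpa using gRowG_noO_left row h 0
  | false => rw [bfold_right row ([], 0, 0)]; simpa using gRowG_noO_right row h 0

theorem rollStep_noDot (di : Int) (row : List String) (j : Int) (h : "." ∉ row) :
    rollStep di row j = row := by
  have hget : ∀ b : String, PySem.List.pyGet? row (j - di) = some b → (b == ".") = false := by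
    intro b hg
    have hb : b ∈ row := by
      apply PySem.List.mem_of_pyGet?_eq_some
      exact hg
    have : b ≠ "." := fun hbo => h (hbo ▸ hb)
    simpa using this
  unfold rollStep
  split
  · cases hg : PySem.List.pyGet? row (j - di) with
    | none => rfl
    | some b =>
      dsimp only
      rw [if_neg (by simp [hget b hg])]
  · split
    · cases hg : PySem.List.pyGet? row (j - di) with
      | none => rfl
      | some b =>
        dsimp only
        rw [if_neg (by simp [hget b hg])]
    · rfl

theorem rollRow_noDot (di : Int) (row : List String) (h : "." ∉ row) :
    rollRow di row = row := by
  unfold rollRow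
  refine foldl_fixed_on
      (fun (r0 : List String) (_z : Int) =>
        (PySem.List.pyRange 0 (PySem.List.len r0) 1).foldl (fun r j => rollStep di r j) r0)
      row (fun _z => ?_) _
  exact foldl_fixed_on _ row (fun j => rollStep_noDot di row j h) _

theorem gRowG_noDot_left (row : List String) (h : "." ∉ row) :
    ∀ nq : Nat, gRowG "." "O" nq 0 row = List.replicate nq "O" ++ row := by
  induction row with
  | nil => intro nq; simp [gRowG]
  | cons c t ih =>
    intro nq
    have hcD : (c == ".") = false := by
      simp only [beq_eq_false_iff_ne, ne_eq]
      intro hc; exact h (hc ▸ List.mem_cons_self)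
    have ht : "." ∉ t := fun hm => h (List.mem_cons_of_mem _ hm)
    by_cases hcO : c = "O"
    · subst hcO
      simp only [gRowG, beq_self_eq_true, if_pos rfl]
      rw [if_pos trivial, ih ht (nq + 1), List.replicate_succ']
      simp
    · have hcO' : (c == "O") = false := by simp [hcO]
      simp only [gRowG, hcO', hcD, if_neg Bool.false_ne_true]
      rw [ih ht 0]
      simp

theorem gRowG_noDot_right (row : List String) (h : "." ∉ row) :
    ∀ np : Nat, gRowG "O" "." 0 np row = List.replicate np "O" ++ row := by
  induction row with
  | nil => intro np; simp [gRowG]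
  | cons c t ih =>
    intro np
    have hcD : (c == ".") = false := by
      simp only [beq_eq_false_iff_ne, ne_eq]
      intro hc; exact h (hc ▸ List.mem_cons_self)
    have ht : "." ∉ t := fun hm => h (List.mem_cons_of_mem _ hm)
    by_cases hcO : c = "O"
    · subst hcO
      simp only [gRowG, hcD, if_neg Bool.false_ne_true, beq_self_eq_true, if_pos rfl]
      rw [if_pos trivial, ih ht (np + 1), List.replicate_succ']
      simp
    · have hcO' : (c == "O") = false := by simp [hcO]
      simp only [gRowG, hcO', hcD, if_neg Bool.false_ne_true]
      rw [ih ht 0]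
      simp

theorem bfin_noDot (left : Bool) (row : List String) (h : "." ∉ row) :
    bfin left (row.foldl (bstep left) ([], 0, 0)) = row := by
  cases left with
  | true => rw [bfold_left row ([], 0, 0)]; simpa using gRowG_noDot_left row h 0
  | false => rw [bfold_right row ([], 0, 0)]; simpa using gRowG_noDot_right row h 0

-- ===== VERDICT (by name: the statement is the Claim_ definition above) =====
theorem roll_c_spec : Claim_equal_roll_c := by
  intro data di _hdom hpre
  unfold Spec_roll_c
  rcases hpre with rfl | rfl | rfl | hmix
  · rw [roll_c_eq_map 1 data]
    have halt : roll_c_alt data 1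
        = data.map (fun row => bfin true (row.foldl (bstep true) ([], 0, 0))) := rfl
    rw [halt]
    apply List.map_congr_left
    intro row _
    rw [rowA_spec 1 "." "O" (by decide) passA_one row, bfold_left row ([], 0, 0)]
    simp
  · rw [roll_c_eq_map (-1) data]
    have halt : roll_c_alt data (-1)
        = data.map (fun row => bfin false (row.foldl (bstep false) ([], 0, 0))) := rfl
    rw [halt]
    apply List.map_congr_left
    intro row _
    rw [rowA_spec (-1) "O" "." (by decide) passA_neg row, bfold_right row ([], 0, 0)]
    simp
  · rw [roll_c_eq_map 0 data,
      show roll_c_alt data 0 = data from rfl]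
    rw [List.map_congr_left (fun row _ => rollRow_zero row)]
    exact List.map_id data
  · have hrow : ∀ row ∈ data, rollRow di row = row := by
      intro row hr
      rcases hmix row hr with hno | hnd
      · exact rollRow_noO di row hno
      · exact rollRow_noDot di row hnd
    have hA : roll_c data di = data := by
      rw [roll_c_eq_map di data, List.map_congr_left hrow]
      exact List.map_id data
    have halt : roll_c_alt data di
        = if di == 0 then data
          else data.map (fun row => bfin (di != -1) (row.foldl (bstep (di != -1)) ([], 0, 0))) :=
      rfl
    have hB : ∀ row ∈ data,
        bfin (di != -1) (row.foldl (bstep (di != -1)) ([], 0, 0)) = row := by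
      intro row hr
      rcases hmix row hr with hno | hnd
      · exact bfin_noO (di != -1) row hno
      · exact bfin_noDot (di != -1) row hnd
    rw [hA, halt]
    by_cases h0 : di = 0
    · simp [h0]
    · rw [if_neg (by simp [h0]), List.map_congr_left hB]
      simp
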